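-- pv_equiv track=rewrite | github.com/posl/comment_recommendation | script/mod_gen/1_time/zh/188_C/5.py | find_second_winner
-- ===== SOURCE A (Python) =====
-- def find_second_winner(n, players):
--     """
--     find the second winner in a tournament
--     """
--     if n == 1:
--         return min(players[0], players[1])
--     else:
--         # find the winner in the first round
--         winners = []
--         for i in range(0, 2**n, 2):
--             winners.append(max(players[i], players[i+1]))
--         # find the second winner in the second round
--         return find_second_winner(n-1, winners)
-- ===== SOURCE B (Python) =====
-- def find_second_winner(n, players):
--     size = 2 ** n
--     half = size // 2
--     return min(max(players[:half]), max(players[half:size]))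
-- ===== Notes on version B (the rewrite author's own statement) =====
-- stated objective: simpler
-- what changed: Replaces the recursive level-by-level pairwise-max reduction with a single closed-form split: the runner-up is the loser of the final, i.e. min of the max of the first half-bracket and the max of the second half-bracket of the first 2**n players.
import Mathlib
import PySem

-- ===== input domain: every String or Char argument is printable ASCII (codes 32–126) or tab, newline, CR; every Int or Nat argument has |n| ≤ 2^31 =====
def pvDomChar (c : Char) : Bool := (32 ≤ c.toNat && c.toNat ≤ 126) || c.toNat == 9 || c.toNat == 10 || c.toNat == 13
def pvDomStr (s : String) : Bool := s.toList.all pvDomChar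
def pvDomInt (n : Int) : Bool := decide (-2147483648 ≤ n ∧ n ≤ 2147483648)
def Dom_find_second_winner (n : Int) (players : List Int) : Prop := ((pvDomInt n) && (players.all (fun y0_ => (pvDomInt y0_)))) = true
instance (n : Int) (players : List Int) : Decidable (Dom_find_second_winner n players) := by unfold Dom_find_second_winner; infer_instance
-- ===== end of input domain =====

-- B replaces A's recursive level-by-level pairwise-max reduction by one split of the first
-- 2^n players into the two half-brackets: answer = min(max(first half), max(second half)).


-- ===== PORT A =====
-- Literal port of A. Python diverges/raises for n ≤ 0 (outside Pre_); the 'n ≤ 0' guard only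
-- makes the recursion total there. players[i] is pyGetD with default 0 (in range under Pre_).
def find_second_winner (n : Int) (players : List Int) : Int :=
  if n ≤ 0 then 0
  else if n = 1 then
    min (PySem.List.pyGetD players 0 0) (PySem.List.pyGetD players 1 0)
  else
    find_second_winner (n - 1)
      ((PySem.List.pyRange 0 ((2 : Int) ^ n.toNat) 2).foldl
        (fun winners i =>
          winners ++ [max (PySem.List.pyGetD players i 0) (PySem.List.pyGetD players (i + 1) 0)]) [])
termination_by n.toNat
decreasing_by omega

-- ===== PORT B =====
-- max(lst) is PySem.List.max? (raises only on empty lst, excluded by Pre_; default 0).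
def find_second_winner_alt (n : Int) (players : List Int) : Int :=
  let size : Int := (2 : Int) ^ n.toNat
  let half : Int := PySem.Int.floordiv size 2
  min ((PySem.List.max? (PySem.List.slice players none (some half)) (fun y => y)).getD 0)
      ((PySem.List.max? (PySem.List.slice players (some half) (some size)) (fun y => y)).getD 0)

-- ===== PRECONDITION & SPEC =====
-- Python A raises IndexError when players has fewer than 2^n entries, and recurses forever /
-- raises TypeError for n ≤ 0; exactly those inputs are excluded.
def Pre_find_second_winner (n : Int) (players : List Int) : Prop :=
  1 ≤ n ∧ 2 ^ n.toNat ≤ players.length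
instance (n : Int) (players : List Int) : Decidable (Pre_find_second_winner n players) := by
  unfold Pre_find_second_winner; infer_instance

def pvWitness_find_second_winner : Int × List Int := (2, [3, 1, 4, 1, 5])

def Spec_find_second_winner (n : Int) (players : List Int) (out : Int) : Prop := out = find_second_winner_alt n players
instance (n : Int) (players : List Int) (out : Int) : Decidable (Spec_find_second_winner n players out) := by unfold Spec_find_second_winner; infer_instance

-- ===== CLAIM (what is proved, stated in full; the proofs are below) =====
def Claim_equal_find_second_winner : Prop := ∀ (n : Int) (players : List Int), Dom_find_second_winner n players → Pre_find_second_winner n players → Spec_find_second_winner n players (find_second_winner n players)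

-- ===== LEMMAS AND PROOFS =====

-- pairwise maxima of consecutive elements (the one round of A's loop, in list form)
def pairMax : List Int → List Int
  | a :: b :: t => max a b :: pairMax t
  | _ => []

-- max of a nonempty list, as the running-max loop (matches PySem.List.max?_id_cons)
def maxOf : List Int → Int
  | [] => 0
  | a :: t => t.foldl max a

lemma maxOf_cons (x : Int) (l : List Int) (h : l ≠ []) :
    maxOf (x :: l) = max x (maxOf l) := by
  cases l with
  | nil => exact absurd rfl h
  | cons y t => simp [maxOf, List.foldl_assoc]

lemma length_pairMax (xs : List Int) : (pairMax xs).length = xs.length / 2 := by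
  fun_induction pairMax xs with
  | case1 a b t ih => simp [ih]; omega
  | case2 xs h => cases xs with
    | nil => rfl
    | cons a t => cases t with
      | nil => simp
      | cons b t' => exact absurd rfl (h a b t')

lemma pairMax_take (c : Nat) (xs : List Int) :
    pairMax (xs.take (2 * c)) = (pairMax xs).take c := by
  induction c generalizing xs with
  | zero => simp [pairMax]
  | succ c ih =>
    cases xs with
    | nil => simp [pairMax]
    | cons a t => cases t with
      | nil =>
        rw [List.take_of_length_le (by simp only [List.length_cons, List.length_nil]; omega)]
        rfl
      | cons b t' =>
        have : 2 * (c + 1) = (2 * c) + 1 + 1 := by omega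
        rw [this]
        simp [pairMax, ih]

lemma pairMax_drop (c : Nat) (xs : List Int) :
    pairMax (xs.drop (2 * c)) = (pairMax xs).drop c := by
  induction c generalizing xs with
  | zero => simp
  | succ c ih =>
    cases xs with
    | nil => simp [pairMax]
    | cons a t => cases t with
      | nil =>
        rw [List.drop_of_length_le (by simp only [List.length_cons, List.length_nil]; omega)]
        rfl
      | cons b t' =>
        have : 2 * (c + 1) = (2 * c) + 1 + 1 := by omega
        rw [this]
        simp [pairMax, ih]

lemma maxOf_pairMax (c : Nat) (xs : List Int) (h : xs.length = 2 * (c + 1)) :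
    maxOf (pairMax xs) = maxOf xs := by
  induction c generalizing xs with
  | zero =>
    match xs, h with
    | [a, b], _ => simp [pairMax, maxOf]
  | succ c ih =>
    match xs, h with
    | a :: b :: t, h =>
      have ht : t.length = 2 * (c + 1) := by simp at h; omega
      have htne : t ≠ [] := by intro h0; rw [h0] at ht; simp at ht
      have hpne : pairMax t ≠ [] := by
        intro h0
        have := length_pairMax t
        rw [h0] at this; simp at this; omega
      rw [show pairMax (a :: b :: t) = max a b :: pairMax t from rfl,
          maxOf_cons _ _ hpne, ih t ht, maxOf_cons a _ (by simp),
          maxOf_cons b _ htne]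
      rw [max_assoc]

-- A's winners loop, over the step-2 range, builds exactly pairMax of the first 2*c elements
lemma map_pair_eq_pairMax (c : Nat) (xs : List Int) (h : 2 * c ≤ xs.length) :
    (List.range c).map (fun j => max (xs.getD (2 * j) 0) (xs.getD (2 * j + 1) 0))
      = pairMax (xs.take (2 * c)) := by
  induction c generalizing xs with
  | zero => simp [pairMax]
  | succ c ih =>
    match xs, h with
    | a :: b :: t, h =>
      have ht : 2 * c ≤ t.length := by simp at h; omega
      rw [List.range_succ_eq_map]
      have h21 : 2 * (c + 1) = (2 * c) + 1 + 1 := by omega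
      rw [h21]
      simp only [List.map_cons, List.map_map, List.take_succ_cons]
      rw [show pairMax (a :: b :: List.take (2 * c) t) = max a b :: pairMax (t.take (2 * c)) from rfl]
      rw [← ih t ht]
      congr 1

-- the main characterisation of A: runner-up = min of the two half-bracket maxima
lemma find_second_winner_eq (k : Nat) (xs : List Int) (h : 2 ^ (k + 1) ≤ xs.length) :
    find_second_winner ((k : Int) + 1) xs
      = min (maxOf (xs.take (2 ^ k))) (maxOf ((xs.drop (2 ^ k)).take (2 ^ k))) := by
  induction k generalizing xs with
  | zero =>
    match xs, h with
    | a :: b :: t, _ =>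
      rw [find_second_winner, if_neg (by omega), if_pos (by norm_num),
          PySem.List.pyGetD_zero_cons]
      have hb : PySem.List.pyGetD (a :: b :: t) 1 0 = b := by
        rw [show (1 : Int) = ((1 : Nat) : Int) from by norm_num, PySem.List.pyGetD_natCast]
        rfl
      rw [hb]
      simp [maxOf, show List.take 1 (a :: b :: t) = [a] from rfl,
            show List.take 1 (b :: t) = [b] from rfl]
  | succ k ih =>
    rw [find_second_winner]
    rw [if_neg (by omega), if_neg (by omega)]
    rw [PySem.List.foldl_append_singleton_eq_map]
    simp only [List.nil_append]
    rw [PySem.List.pyRange_of_pos 0 _ (by norm_num)]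
    rw [show ((k + 1 : Nat) : Int) + 1 - 1 = (k : Int) + 1 from by push_cast; ring]
    rw [show ((k + 1 : Nat) : Int) + 1 = (k : Int) + 1 + 1 from by push_cast; ring]
    have htn : ((k : Int) + 1 + 1).toNat = k + 1 + 1 := by omega
    rw [htn]
    have hM : (if (0:Int) < 2 ^ (k + 1 + 1) then (((2:Int) ^ (k + 1 + 1) - 0 + 2 - 1) / 2).toNat else 0)
        = 2 ^ (k + 1) := by
      rw [if_pos (by positivity)]
      have hc : ((2:Int) ^ (k + 1)) = ((2 ^ (k + 1) : Nat) : Int) := by push_cast; ring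
      have he : (2:Int) ^ (k + 1 + 1) = 2 * (2:Int) ^ (k + 1) := by ring
      rw [he, hc]
      generalize (2 ^ (k + 1) : Nat) = X
      omega
    rw [hM, List.map_map]
    have hwin : (List.range (2 ^ (k + 1))).map
        ((fun i => max (PySem.List.pyGetD xs i 0) (PySem.List.pyGetD xs (i + 1) 0)) ∘ fun j : Nat => (0 : Int) + 2 * (j : Int))
        = pairMax (xs.take (2 ^ (k + 1 + 1))) := by
      have h2 : 2 * 2 ^ (k + 1) = 2 ^ (k + 1 + 1) := by ring
      rw [← h2, ← map_pair_eq_pairMax (2 ^ (k + 1)) xs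
        (by have h1 : 1 ≤ 2 ^ k := Nat.one_le_two_pow
            have e : 2 * 2 ^ (k + 1) = 2 ^ (k + 1 + 1) := by ring
            omega)]
      apply List.map_congr_left
      intro j _
      simp only [Function.comp_apply, zero_add]
      have c1 : (2 : Int) * (j : Int) = ((2 * j : Nat) : Int) := by push_cast; ring
      rw [c1, show ((2 * j : Nat) : Int) + 1 = ((2 * j + 1 : Nat) : Int) from by push_cast; ring,
          PySem.List.pyGetD_natCast, PySem.List.pyGetD_natCast]
    rw [hwin]
    have hd : 2 ^ (k + 1 + 1) = 2 * 2 ^ (k + 1) := by ring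
    have hd' : 2 ^ (k + 1) = 2 * 2 ^ k := by ring
    have hlen : (pairMax (xs.take (2 ^ (k + 1 + 1)))).length = 2 ^ (k + 1) := by
      rw [length_pairMax, List.length_take, min_eq_left h, hd]
      omega
    rw [ih _ hlen.ge]
    -- first half
    have e1 : (pairMax (xs.take (2 ^ (k + 1 + 1)))).take (2 ^ k) = pairMax (xs.take (2 ^ (k + 1))) := by
      rw [← pairMax_take, List.take_take]
      congr 1
      rw [show (2 : Nat) * 2 ^ k = 2 ^ (k + 1) from by ring]
      rw [show min (2 ^ (k + 1)) (2 ^ (k + 1 + 1)) = 2 ^ (k + 1) from by rw [hd]; omega]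
    -- second half
    have e2 : ((pairMax (xs.take (2 ^ (k + 1 + 1)))).drop (2 ^ k)).take (2 ^ k)
        = pairMax ((xs.drop (2 ^ (k + 1))).take (2 ^ (k + 1))) := by
      rw [← pairMax_drop, ← pairMax_take]
      congr 1
      rw [List.drop_take, List.take_take]
      rw [show (2 : Nat) * 2 ^ k = 2 ^ (k + 1) from by ring]
      rw [show (2 : Nat) ^ (k + 1 + 1) - 2 ^ (k + 1) = 2 ^ (k + 1) from by rw [hd]; omega,
          min_self]
    rw [e1, e2]
    have hh : 2 * 2 ^ (k + 1) ≤ xs.length := by rw [← hd]; exact h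
    have h1 : 1 ≤ 2 ^ k := Nat.one_le_two_pow
    have m1 : maxOf (pairMax (xs.take (2 ^ (k + 1)))) = maxOf (xs.take (2 ^ (k + 1))) := by
      apply maxOf_pairMax (2 ^ k - 1)
      rw [List.length_take, min_eq_left (by omega), hd']
      omega
    have m2 : maxOf (pairMax ((xs.drop (2 ^ (k + 1))).take (2 ^ (k + 1))))
        = maxOf ((xs.drop (2 ^ (k + 1))).take (2 ^ (k + 1))) := by
      apply maxOf_pairMax (2 ^ k - 1)
      rw [List.length_take, List.length_drop, min_eq_left (by omega), hd']
      omega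
    rw [m1, m2]

lemma max?_getD_eq_maxOf (xs : List Int) (h : xs ≠ []) :
    (PySem.List.max? xs (fun y => y)).getD 0 = maxOf xs := by
  cases xs with
  | nil => exact absurd rfl h
  | cons a t => rw [PySem.List.max?_id_cons]; rfl

-- ===== VERDICT (by name: the statement is the Claim_ definition above) =====
theorem find_second_winner_spec : Claim_equal_find_second_winner := by
  intro n players _ hpre
  obtain ⟨hn, hlen⟩ := hpre
  unfold Spec_find_second_winner find_second_winner_alt
  set m : Nat := n.toNat with hm
  have hm1 : 1 ≤ m := by omega
  have hpw2 : 2 ^ m = 2 * 2 ^ (m - 1) := by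
    rw [← pow_succ']
    congr 1
    omega
  have hn' : n = ((m - 1 : Nat) : Int) + 1 := by omega
  have hpow : (2 : Int) ^ m = ((2 ^ m : Nat) : Int) := by push_cast; ring
  have hhalf : PySem.Int.floordiv ((2 : Int) ^ m) 2 = ((2 ^ (m - 1) : Nat) : Int) := by
    rw [hpow]
    rw [show ((2 : Int)) = ((2 : Nat) : Int) from rfl] at *
    rw [PySem.Int.floordiv_natCast]
    congr 1
    omega
  simp only
  rw [hhalf, hpow, PySem.List.slice_to_natCast, PySem.List.slice_natCast]
  have hsplit : 2 ^ m - 2 ^ (m - 1) = 2 ^ (m - 1) := by omega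
  rw [hsplit]
  have h1 : 1 ≤ 2 ^ (m - 1) := Nat.one_le_two_pow
  have hne1 : players.take (2 ^ (m - 1)) ≠ [] := by
    intro h0
    have := congrArg List.length h0
    rw [List.length_take] at this
    simp only [List.length_nil] at this
    omega
  have hne2 : (players.drop (2 ^ (m - 1))).take (2 ^ (m - 1)) ≠ [] := by
    intro h0
    have := congrArg List.length h0
    rw [List.length_take, List.length_drop] at this
    simp only [List.length_nil] at this
    omega
  rw [max?_getD_eq_maxOf _ hne1, max?_getD_eq_maxOf _ hne2]
  rw [hn']
  rw [find_second_winner_eq (m - 1) players (by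
    have hmm : m - 1 + 1 = m := by omega
    rw [hmm]
    exact hlen)]
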